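-- pv_equiv track=rewrite | github.com/aimclub/documentor | documentor/processing/parsers/pdf/ocr/html_table_parser.py | detect_merged_tables
-- ===== SOURCE A (Python) =====
-- def detect_merged_tables(markdown_content: str) -> list[str]:
--     """
--     Обнаруживает несколько таблиц в markdown контенте.
--
--     Args:
--         markdown_content: Markdown строка, возможно содержащая несколько таблиц
--
--     Returns:
--         Список отдельных таблиц в markdown формате
--     """
--     if not markdown_content:
--         return []
--
--     # Разделяем по двойным переносам строк (пустые строки между таблицами)
--     parts = markdown_content.split('\n\n')
--
--     tables = []
--     current_table = []
--
--     for part in parts: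
--         lines = part.strip().split('\n')
--         # Проверяем, является ли это таблицей (содержит |)
--         if any('|' in line for line in lines):
--             if current_table:
--                 # Сохраняем предыдущую таблицу
--                 tables.append('\n'.join(current_table))
--                 current_table = []
--             # Добавляем строки текущей таблицы
--             current_table.extend(lines)
--         else:
--             if current_table:
--                 # Добавляем к текущей таблице
--                 current_table.extend(lines)
--
--     # Добавляем последнюю таблицу
--     if current_table:
--         tables.append('\n'.join(current_table))
--
--     # Если не нашли разделения, возвращаем как одну таблицу
--     if not tables:
--         tables = [markdown_content]
--
--     return tables
-- ===== SOURCE B (Python) =====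
-- def detect_merged_tables(markdown_content: str) -> list[str]:
--     if not markdown_content:
--         return []
--     # Per-part line lists of the blank-line-separated parts.
--     line_lists = [p.strip().split('\n') for p in markdown_content.split('\n\n')]
--     # Boundary indices: positions of the table parts.
--     starts = [i for i, ls in enumerate(line_lists) if any('|' in l for l in ls)]
--     if not starts:
--         return [markdown_content]
--     # Each table is the flattened span from one boundary to the next.
--     bounds = starts + [len(line_lists)]
--     return ['\n'.join(l for ls in line_lists[a:b] for l in ls)
--             for a, b in zip(bounds, bounds[1:])]
-- ===== Notes on version B (the rewrite author's own statement) =====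
-- stated objective: alternative
-- what changed: A's single stateful loop that buffers a current_table and flushes it when a new table part arrives is replaced by a boundary-index algorithm: compute the list of indices of the table parts, append the length as a final bound, and emit one table per consecutive boundary pair by slicing the part list and flattening the lines of each slice.
import Mathlib
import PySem

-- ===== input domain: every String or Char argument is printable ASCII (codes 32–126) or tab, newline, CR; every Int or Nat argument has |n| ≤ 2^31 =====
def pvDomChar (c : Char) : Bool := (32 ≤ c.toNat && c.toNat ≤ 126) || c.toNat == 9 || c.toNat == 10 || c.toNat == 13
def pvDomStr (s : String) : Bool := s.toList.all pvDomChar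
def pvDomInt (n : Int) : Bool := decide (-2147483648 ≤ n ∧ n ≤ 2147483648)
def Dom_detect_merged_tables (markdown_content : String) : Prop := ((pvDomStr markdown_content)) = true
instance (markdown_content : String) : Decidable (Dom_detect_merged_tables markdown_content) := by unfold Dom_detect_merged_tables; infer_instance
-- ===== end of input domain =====

-- B replaces A's stateful flush loop by a boundary-index algorithm: find the indices of the
-- table parts, then slice the part list between consecutive boundaries; objective: alternative.

-- ===== PORT A =====
-- part.strip().split('\n'); the separator "\n" is nonempty, so split? is never none
def pvLinesA (part : String) : List String :=
  (PySem.Str.split? (PySem.Str.strip part) "\n").getD []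

-- the body of A's 'for part in parts' loop over state (tables, current_table)
def pvStepA (st : List String × List String) (part : String) : List String × List String :=
  let lines := pvLinesA part
  if lines.any (fun line => PySem.Str.isIn "|" line) then
    let st' := if st.2 ≠ [] then (st.1 ++ [PySem.Str.join "\n" st.2], ([] : List String)) else st
    (st'.1, st'.2 ++ lines)
  else
    if st.2 ≠ [] then (st.1, st.2 ++ lines) else st

def detect_merged_tables (markdown_content : String) : List String :=
  if markdown_content = "" then []
  else
    let parts := (PySem.Str.split? markdown_content "\n\n").getD []
    let res := parts.foldl pvStepA ([], [])
    let tables := if res.2 ≠ [] then res.1 ++ [PySem.Str.join "\n" res.2] else res.1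
    if tables = [] then [markdown_content] else tables

-- ===== PORT B =====
-- p.strip().split('\n')
def pvLinesB (part : String) : List String :=
  (PySem.Str.split? (PySem.Str.strip part) "\n").getD []

-- any('|' in l for l in ls)
def pvIsTable (ls : List String) : Bool := ls.any (fun l => PySem.Str.isIn "|" l)

def detect_merged_tables_alt (markdown_content : String) : List String :=
  if markdown_content = "" then []
  else
    let line_lists := ((PySem.Str.split? markdown_content "\n\n").getD []).map pvLinesB
    let starts : List Int := (PySem.List.enumerate line_lists 0).filterMap
      (fun p => if pvIsTable p.2 then some p.1 else none)
    if starts = [] then [markdown_content]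
    else
      let bounds := starts ++ [(line_lists.length : Int)]
      (bounds.zip bounds.tail).map
        (fun p => PySem.Str.join "\n"
          (PySem.List.slice line_lists (some p.1) (some p.2)).flatten)

-- ===== PRECONDITION & SPEC =====
def Spec_detect_merged_tables (markdown_content : String) (out : List String) : Prop := out = detect_merged_tables_alt markdown_content
instance (markdown_content : String) (out : List String) : Decidable (Spec_detect_merged_tables markdown_content out) := by unfold Spec_detect_merged_tables; infer_instance

-- ===== CLAIM (what is proved, stated in full; the proofs are below) =====
def Claim_equal_detect_merged_tables : Prop := ∀ (markdown_content : String), Dom_detect_merged_tables markdown_content → Spec_detect_merged_tables markdown_content (detect_merged_tables markdown_content)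

-- ===== LEMMAS AND PROOFS =====

-- common grouping semantics both ports are reduced to
def pvSeg (cur : List String) : List (List String) → List (List String)
  | [] => [cur]
  | ls :: rest => if pvIsTable ls then cur :: pvSeg ls rest else pvSeg (cur ++ ls) rest

def pvGroups : List (List String) → List (List String)
  | [] => []
  | ls :: rest => if pvIsTable ls then pvSeg ls rest else pvGroups rest

-- Nat-valued boundary indices
def pvStartsN : List (List String) → List Nat
  | [] => []
  | ls :: rest =>
      if pvIsTable ls then 0 :: (pvStartsN rest).map (· + 1)
      else (pvStartsN rest).map (· + 1)

lemma pvGo_ne_nil (sep : List Char) (fuel : Nat) : ∀ (l cur : List Char) (acc : List (List Char)),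
    PySem.Chars.splitOn.go sep fuel l cur acc ≠ [] := by
  induction fuel with
  | zero => intro l cur acc; simp [PySem.Chars.splitOn.go]
  | succ n ih =>
    intro l cur acc
    cases l with
    | nil => simp [PySem.Chars.splitOn.go]
    | cons c rest =>
      rw [PySem.Chars.splitOn.go]
      split
      · exact ih _ _ _
      · exact ih _ _ _

lemma pvLinesA_ne_nil (part : String) : pvLinesA part ≠ [] := by
  simp [pvLinesA, PySem.Str.split?, PySem.Chars.split?, PySem.Chars.splitOn]
  intro h
  exact pvGo_ne_nil _ _ _ _ _ h

-- A-side: the fold computes pvGroups / pvSeg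
lemma pvLoopA : ∀ (parts : List String) (tables cur : List String),
    (if (parts.foldl pvStepA (tables, cur)).2 ≠ []
       then (parts.foldl pvStepA (tables, cur)).1
            ++ [PySem.Str.join "\n" (parts.foldl pvStepA (tables, cur)).2]
       else (parts.foldl pvStepA (tables, cur)).1)
    = tables ++ (if cur = [] then pvGroups (parts.map pvLinesA)
                 else pvSeg cur (parts.map pvLinesA)).map (PySem.Str.join "\n") := by
  intro parts
  induction parts with
  | nil =>
    intro tables cur
    by_cases hc : cur = [] <;> simp [hc, pvGroups, pvSeg]
  | cons p rest ih =>
    intro tables cur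
    have hlines := pvLinesA_ne_nil p
    rw [List.foldl_cons, List.map_cons]
    by_cases hT : pvIsTable (pvLinesA p) = true
    · have hA : pvStepA (tables, cur) p =
          ((if cur ≠ [] then tables ++ [PySem.Str.join "\n" cur] else tables), pvLinesA p) := by
        simp only [pvStepA, pvIsTable] at hT ⊢
        rw [hT]
        by_cases hc : cur = [] <;> simp [hc]
      rw [hA]
      by_cases hc : cur = []
      · simp only [hc, ne_eq, not_true_eq_false, if_false, ite_true]
        rw [ih tables (pvLinesA p)]
        simp [pvGroups, hT, hlines]
      · simp only [hc, ne_eq, not_false_eq_true, if_true, if_false]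
        rw [ih (tables ++ [PySem.Str.join "\n" cur]) (pvLinesA p)]
        simp [pvSeg, hT, hlines]
    · have hT' : pvIsTable (pvLinesA p) = false := by simpa using hT
      have hA : pvStepA (tables, cur) p =
          (if cur ≠ [] then (tables, cur ++ pvLinesA p) else (tables, cur)) := by
        simp only [pvStepA, pvIsTable] at hT' ⊢
        rw [hT']
        by_cases hc : cur = [] <;> simp [hc]
      rw [hA]
      by_cases hc : cur = []
      · simp only [hc, ne_eq, not_true_eq_false, if_false, ite_true]
        rw [ih tables []]
        simp [pvGroups, hT']
      · simp only [hc, ne_eq, not_false_eq_true, if_true, if_false]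
        rw [ih tables (cur ++ pvLinesA p)]
        simp [pvSeg, hT', hc, hlines]

-- B-side: enumerate/filterMap computes pvStartsN
lemma pvStarts_eq : ∀ (lls : List (List String)) (s : Int),
    (PySem.List.enumerate lls s).filterMap (fun p => if pvIsTable p.2 then some p.1 else none)
    = (pvStartsN lls).map (fun n : Nat => s + (n : Int)) := by
  intro lls
  have key : ∀ (rest : List Nat) (t : Int),
      (rest.map (· + 1)).map (fun n : Nat => t + (n : Int))
      = rest.map (fun n : Nat => (t + 1) + (n : Int)) := by
    intro rest t
    rw [List.map_map]
    apply List.map_congr_left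
    intro n _
    simp only [Function.comp]
    push_cast
    ring
  induction lls with
  | nil => intro s; simp [PySem.List.enumerate_nil, pvStartsN]
  | cons ls rest ih =>
    intro s
    rw [PySem.List.enumerate_cons, List.filterMap_cons]
    by_cases hT : pvIsTable ls = true
    · simp only [hT, if_true, pvStartsN, List.map_cons]
      rw [key, ← ih (s + 1)]
      simp
    · have hT' : pvIsTable ls = false := by simpa using hT
      simp only [hT', pvStartsN, Bool.false_eq_true, if_false]
      rw [key, ← ih (s + 1)]

lemma pvSeg_ne_nil (cur : List String) (lls : List (List String)) : pvSeg cur lls ≠ [] := by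
  induction lls generalizing cur with
  | nil => simp [pvSeg]
  | cons ls rest ih =>
    by_cases hT : pvIsTable ls = true <;> simp [pvSeg, hT, ih]

lemma pvStartsN_nil_iff : ∀ (lls : List (List String)),
    pvStartsN lls = [] ↔ pvGroups lls = [] := by
  intro lls
  induction lls with
  | nil => simp [pvStartsN, pvGroups]
  | cons ls rest ih =>
    by_cases hT : pvIsTable ls = true
    · simp [pvStartsN, pvGroups, hT, pvSeg_ne_nil]
    · have hT' : pvIsTable ls = false := by simpa using hT
      simp [pvStartsN, pvGroups, hT', ih]

lemma pvSeg_all_false : ∀ (lls : List (List String)), pvStartsN lls = [] →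
    ∀ cur, pvSeg cur lls = [cur ++ lls.flatten] := by
  intro lls
  induction lls with
  | nil => intro _ cur; simp [pvSeg]
  | cons ls rest ih =>
    intro h cur
    by_cases hT : pvIsTable ls = true
    · simp [pvStartsN, hT] at h
    · have hT' : pvIsTable ls = false := by simpa using hT
      simp only [pvStartsN, hT', Bool.false_eq_true, if_false, List.map_eq_nil_iff] at h
      simp [pvSeg, hT', ih h, List.flatten_cons]

lemma pvSeg_first_start : ∀ (lls : List (List String)) (j : Nat) (js : List Nat) (cur : List String),
    pvStartsN lls = j :: js →
    pvSeg cur lls = (cur ++ (lls.take j).flatten) :: pvGroups lls := by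
  intro lls
  induction lls with
  | nil => intro j js cur h; simp [pvStartsN] at h
  | cons ls rest ih =>
    intro j js cur h
    by_cases hT : pvIsTable ls = true
    · simp only [pvStartsN, hT, if_true, List.cons.injEq] at h
      obtain ⟨hj, -⟩ := h
      subst hj
      simp [pvSeg, pvGroups, hT]
    · have hT' : pvIsTable ls = false := by simpa using hT
      simp only [pvStartsN, hT', Bool.false_eq_true, if_false] at h
      cases hr : pvStartsN rest with
      | nil => rw [hr] at h; simp at h
      | cons j' js' =>
        rw [hr] at h
        simp only [List.map_cons, List.cons.injEq] at h
        obtain ⟨hj, -⟩ := h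
        subst hj
        rw [show pvSeg cur (ls :: rest) = pvSeg (cur ++ ls) rest by simp [pvSeg, hT'],
            ih j' js' (cur ++ ls) hr]
        simp [pvGroups, hT', List.take_succ_cons, List.flatten_cons, List.append_assoc]

-- the slice-between-consecutive-boundaries construction, on Nat indices
def pvSegsOf (lls : List (List String)) : List (List String) :=
  ((pvStartsN lls ++ [lls.length]).zip (pvStartsN lls ++ [lls.length]).tail).map
    (fun p => ((lls.drop p.1).take (p.2 - p.1)).flatten)

lemma pvShift (ns : List Nat) (ls : List String) (lls : List (List String)) :
    ((ns.map (· + 1)).zip (ns.map (· + 1)).tail).map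
      (fun p => (((ls :: lls).drop p.1).take (p.2 - p.1)).flatten)
    = (ns.zip ns.tail).map (fun p => ((lls.drop p.1).take (p.2 - p.1)).flatten) := by
  rw [← List.map_tail, List.zip_map, List.map_map]
  apply List.map_congr_left
  intro p _
  simp [Nat.succ_sub_succ]

lemma pvSegsOf_eq : ∀ (lls : List (List String)), pvStartsN lls ≠ [] →
    pvSegsOf lls = pvGroups lls := by
  intro lls
  induction lls with
  | nil => intro h; simp [pvStartsN] at h
  | cons ls rest ih =>
    intro hne
    by_cases hT : pvIsTable ls = true
    · cases hr : pvStartsN rest with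
      | nil =>
        have hflat := pvSeg_all_false rest hr ls
        simp only [pvSegsOf, pvStartsN, hT, if_true, hr, List.map_nil, List.nil_append,
          List.length_cons, List.cons_append, List.nil_append]
        simp [pvGroups, hT, hflat, List.take_of_length_le, List.flatten_cons]
      | cons j js =>
        have hrest : pvSegsOf rest = pvGroups rest := ih (by simp [hr])
        have hfirst := pvSeg_first_start rest j js ls hr
        simp only [pvSegsOf, pvStartsN, hT, if_true, hr, List.length_cons, List.map_cons,
          List.cons_append, List.map_cons]
        rw [List.tail_cons, List.zip_cons_cons, List.map_cons]
        rw [show (((j + 1) :: (List.map (fun x => x + 1) js ++ [rest.length + 1])).zip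
              (List.map (fun x => x + 1) js ++ [rest.length + 1]))
            = (((j :: js ++ [rest.length]).map (· + 1)).zip
              ((j :: js ++ [rest.length]).map (· + 1)).tail) by simp]
        rw [pvShift]
        simp only [pvSegsOf, hr, List.cons_append] at hrest
        rw [show pvGroups (ls :: rest) = (ls ++ (List.take j rest).flatten) :: pvGroups rest
              from by simp [pvGroups, hT, hfirst]]
        congr 1
    · have hT' : pvIsTable ls = false := by simpa using hT
      have hr : pvStartsN rest ≠ [] := by
        simp only [pvStartsN, hT', Bool.false_eq_true, if_false, ne_eq,
          List.map_eq_nil_iff] at hne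
        exact hne
      have hrest : pvSegsOf rest = pvGroups rest := ih hr
      simp only [pvSegsOf, pvStartsN, hT', Bool.false_eq_true, if_false, List.length_cons]
      rw [show ((pvStartsN rest).map (fun x => x + 1) ++ [rest.length + 1]
            = ((pvStartsN rest) ++ [rest.length]).map (· + 1)) by simp]
      rw [pvShift]
      rw [show pvGroups (ls :: rest) = pvGroups rest by simp [pvGroups, hT']]
      exact hrest

lemma pvFinal (mc : String) (h0 : ¬ mc = "") :
    detect_merged_tables mc = detect_merged_tables_alt mc := by
  unfold detect_merged_tables detect_merged_tables_alt
  simp only [h0, if_false]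
  have hLB : pvLinesB = pvLinesA := rfl
  rw [hLB]
  set parts := (PySem.Str.split? mc "\n\n").getD [] with hp
  set L := parts.map pvLinesA with hL
  set N := pvStartsN L with hN
  have hA := pvLoopA parts [] []
  simp only [ite_true, List.nil_append, ← hL] at hA
  rw [hA]
  have hS0 : (PySem.List.enumerate L 0).filterMap
      (fun p => if pvIsTable p.2 then some p.1 else none)
      = N.map (fun n : Nat => (n : Int)) := by
    rw [pvStarts_eq L 0, hN]
    apply List.map_congr_left
    intro n _
    simp
  rw [hS0]
  by_cases hs : N = []
  · have hg : pvGroups L = [] := (pvStartsN_nil_iff L).mp (hN ▸ hs)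
    simp [hs, hg]
  · have hg : pvGroups L ≠ [] := fun hh => hs (hN ▸ (pvStartsN_nil_iff L).mpr hh)
    have hmapne : N.map (fun n : Nat => (n : Int)) ≠ [] := by simp [hs]
    simp only [hmapne, if_false, List.map_eq_nil_iff, hg]
    have hbounds : (N.map (fun n : Nat => (n : Int))) ++ [((L.length : Nat) : Int)]
        = (N ++ [L.length]).map (fun n : Nat => (n : Int)) := by simp
    rw [hbounds]
    have hzip : (((N ++ [L.length]).map (fun n : Nat => (n : Int))).zip
          ((N ++ [L.length]).map (fun n : Nat => (n : Int))).tail).map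
          (fun p => PySem.Str.join "\n" (PySem.List.slice L (some p.1) (some p.2)).flatten)
        = (pvSegsOf L).map (PySem.Str.join "\n") := by
      rw [← List.map_tail, List.zip_map, List.map_map]
      simp only [pvSegsOf, List.map_map, hN]
      apply List.map_congr_left
      intro p _
      simp [Function.comp, PySem.List.slice_natCast]
    rw [hzip, pvSegsOf_eq L (hN ▸ hs)]

-- ===== VERDICT (by name: the statement is the Claim_ definition above) =====
theorem detect_merged_tables_spec : Claim_equal_detect_merged_tables := by
  intro mc _
  unfold Spec_detect_merged_tables
  by_cases h0 : mc = ""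
  · simp [h0, detect_merged_tables, detect_merged_tables_alt]
  · exact pvFinal mc h0
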